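-- pv_equiv track=rewrite | github.com/siriusnen-commits/archmind-mvp | src/archmind/failure.py | select_primary_failure_class
-- ===== SOURCE A (Python) =====
-- def select_primary_failure_class(failure_signature: str, classified_failure_class: str) -> str:
--     klass = (classified_failure_class or "").strip().lower()
--     sig = (failure_signature or "").lower()
--     if klass and klass != "unknown":
--         return klass
--     has_backend = "backend-pytest" in sig
--     has_frontend = any(
--         tok in sig
--         for tok in ("frontend-lint-warning", "frontend-lint", "frontend-build", "frontend-typescript", "frontend-test")
--     )
--     if has_backend:
--         return "backend-pytest:other"
--     if has_frontend:
--         if "frontend-lint-warning" in sig: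
--             return "frontend-lint-warning"
--         if "frontend-lint" in sig:
--             return "frontend-lint"
--         if "frontend-typescript" in sig:
--             return "frontend-typescript"
--         if "frontend-build" in sig:
--             return "frontend-build"
--         if "frontend-test" in sig:
--             return "frontend-test"
--         return "frontend-other"
--     if "environment" in sig or "env-dependency" in sig:
--         return "environment-other"
--     if "filesystem" in sig:
--         return "filesystem-other"
--     return "unknown"
-- ===== SOURCE B (Python) =====
-- TOKENS = ("backend-pytest", "frontend-lint-warning", "frontend-lint",
--           "frontend-typescript", "frontend-build", "frontend-test",
--           "environment", "env-dependency", "filesystem")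
--
-- PRIORITY = [
--     ("backend-pytest", "backend-pytest:other"),
--     ("frontend-lint-warning", "frontend-lint-warning"),
--     ("frontend-lint", "frontend-lint"),
--     ("frontend-typescript", "frontend-typescript"),
--     ("frontend-build", "frontend-build"),
--     ("frontend-test", "frontend-test"),
--     ("environment", "environment-other"),
--     ("env-dependency", "environment-other"),
--     ("filesystem", "filesystem-other"),
-- ]
--
--
-- def _scan_tokens(sig):
--     """Naive multi-pattern matcher: walk every suffix of sig once and
--     collect every known token that starts there."""
--     found = set()
--     suffix = sig
--     while suffix:
--         for t in TOKENS:
--             if suffix.startswith(t):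
--                 found.add(t)
--         suffix = suffix[1:]
--     return found
--
--
-- def select_primary_failure_class(failure_signature: str, classified_failure_class: str) -> str:
--     klass = (classified_failure_class or "").strip().lower()
--     if klass and klass != "unknown":
--         return klass
--     found = _scan_tokens((failure_signature or "").lower())
--     for tok, cls in PRIORITY:
--         if tok in found:
--             return cls
--     return "unknown"
-- ===== Notes on version B (the rewrite author's own statement) =====
-- stated objective: alternative
-- what changed: Replaces A's per-token substring searches and branch cascade by a naive multi-pattern matcher: one walk over every suffix of sig collecting all matched tokens into a set, followed by a single priority-table lookup over that set.
import Mathlib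
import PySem

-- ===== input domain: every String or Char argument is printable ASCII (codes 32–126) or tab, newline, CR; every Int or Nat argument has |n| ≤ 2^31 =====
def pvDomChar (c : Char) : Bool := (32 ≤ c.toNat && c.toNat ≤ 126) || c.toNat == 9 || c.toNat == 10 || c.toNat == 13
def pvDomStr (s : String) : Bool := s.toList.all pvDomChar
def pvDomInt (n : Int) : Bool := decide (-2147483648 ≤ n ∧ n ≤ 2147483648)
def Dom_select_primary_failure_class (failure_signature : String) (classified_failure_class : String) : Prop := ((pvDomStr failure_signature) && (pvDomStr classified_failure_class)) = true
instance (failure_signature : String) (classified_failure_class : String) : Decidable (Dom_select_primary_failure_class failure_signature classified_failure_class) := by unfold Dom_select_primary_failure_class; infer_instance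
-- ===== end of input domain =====

-- B replaces A's repeated `tok in sig` searches and branch cascade by a single walk over the
-- suffixes of sig collecting matched tokens into a set, then one priority lookup (alternative; same cost class).


-- ===== PORT A =====
def select_primary_failure_class (failure_signature : String) (classified_failure_class : String) : String :=
  let klass := PySem.Str.lower (PySem.Str.strip classified_failure_class)
  let sig := PySem.Str.lower failure_signature
  if klass ≠ "" ∧ klass ≠ "unknown" then klass
  else
    let has_backend := PySem.Str.isIn "backend-pytest" sig
    let has_frontend := ["frontend-lint-warning", "frontend-lint", "frontend-build", "frontend-typescript", "frontend-test"].any (fun tok => PySem.Str.isIn tok sig)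
    if has_backend then "backend-pytest:other"
    else if has_frontend then
      if PySem.Str.isIn "frontend-lint-warning" sig then "frontend-lint-warning"
      else if PySem.Str.isIn "frontend-lint" sig then "frontend-lint"
      else if PySem.Str.isIn "frontend-typescript" sig then "frontend-typescript"
      else if PySem.Str.isIn "frontend-build" sig then "frontend-build"
      else if PySem.Str.isIn "frontend-test" sig then "frontend-test"
      else "frontend-other"
    else if PySem.Str.isIn "environment" sig || PySem.Str.isIn "env-dependency" sig then "environment-other"
    else if PySem.Str.isIn "filesystem" sig then "filesystem-other"
    else "unknown"

-- ===== PORT B =====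
def pvTokens : List String :=
  ["backend-pytest", "frontend-lint-warning", "frontend-lint",
   "frontend-typescript", "frontend-build", "frontend-test",
   "environment", "env-dependency", "filesystem"]

def pvPriority : List (String × String) :=
  [("backend-pytest", "backend-pytest:other"),
   ("frontend-lint-warning", "frontend-lint-warning"),
   ("frontend-lint", "frontend-lint"),
   ("frontend-typescript", "frontend-typescript"),
   ("frontend-build", "frontend-build"),
   ("frontend-test", "frontend-test"),
   ("environment", "environment-other"),
   ("env-dependency", "environment-other"),
   ("filesystem", "filesystem-other")]

-- Source B's `_scan_tokens`: the `while suffix: … suffix = suffix[1:]` walk, as structural recursion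
-- over the character list of sig (exact: each step tests startswith on the current suffix).
def pvScanTokens : List Char → PySem.Set String → PySem.Set String
  | [], found => found
  | c :: rest, found =>
      pvScanTokens rest
        (pvTokens.foldl (fun a t => if PySem.Chars.startswith (c :: rest) t.toList then PySem.Set.add a t else a) found)

-- Source B's final `for tok, cls in PRIORITY: if tok in found: return cls` loop
def pvPick : List (String × String) → PySem.Set String → String
  | [], _ => "unknown"
  | (tok, cls) :: rest, found => if PySem.Set.contains found tok then cls else pvPick rest found

def select_primary_failure_class_alt (failure_signature : String) (classified_failure_class : String) : String :=
  let klass := PySem.Str.lower (PySem.Str.strip classified_failure_class)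
  if klass ≠ "" ∧ klass ≠ "unknown" then klass
  else pvPick pvPriority (pvScanTokens (PySem.Str.lower failure_signature).toList PySem.Set.empty)

-- ===== PRECONDITION & SPEC =====
def Spec_select_primary_failure_class (failure_signature : String) (classified_failure_class : String) (out : String) : Prop := out = select_primary_failure_class_alt failure_signature classified_failure_class
instance (failure_signature : String) (classified_failure_class : String) (out : String) : Decidable (Spec_select_primary_failure_class failure_signature classified_failure_class out) := by unfold Spec_select_primary_failure_class; infer_instance

-- ===== CLAIM (what is proved, stated in full; the proofs are below) =====
def Claim_equal_select_primary_failure_class : Prop := ∀ (failure_signature : String) (classified_failure_class : String), Dom_select_primary_failure_class failure_signature classified_failure_class → Spec_select_primary_failure_class failure_signature classified_failure_class (select_primary_failure_class failure_signature classified_failure_class)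

-- ===== LEMMAS AND PROOFS =====

-- membership after the inner token loop of one suffix step
lemma pv_mem_step (s : List Char) (l : List String) (acc : List String) (t : String) :
    t ∈ l.foldl (fun a tk => if PySem.Chars.startswith s tk.toList then PySem.Set.add a tk else a) acc ↔
    t ∈ acc ∨ (t ∈ l ∧ PySem.Chars.startswith s t.toList = true) := by
  induction l generalizing acc with
  | nil => simp
  | cons hd tl ih =>
    simp only [List.foldl_cons, ih, List.mem_cons]
    by_cases h : PySem.Chars.startswith s hd.toList = true
    · rw [if_pos h, PySem.Set.mem_add]
      constructor
      · rintro ((h1 | rfl) | h2)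
        · exact Or.inl h1
        · exact Or.inr ⟨Or.inl rfl, h⟩
        · exact Or.inr ⟨Or.inr h2.1, h2.2⟩
      · rintro (h1 | ⟨rfl | h2, hsw⟩)
        · exact Or.inl (Or.inl h1)
        · exact Or.inl (Or.inr rfl)
        · exact Or.inr ⟨h2, hsw⟩
    · rw [if_neg h]
      constructor
      · rintro (h1 | h2)
        · exact Or.inl h1
        · exact Or.inr ⟨Or.inr h2.1, h2.2⟩
      · rintro (h1 | ⟨rfl | h2, hsw⟩)
        · exact Or.inl h1
        · exact absurd hsw h
        · exact Or.inr ⟨h2, hsw⟩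

lemma pv_mem_scanTokens (s : List Char) (acc : List String) (t : String) (ht : t.toList ≠ []) :
    t ∈ pvScanTokens s acc ↔
    t ∈ acc ∨ (t ∈ pvTokens ∧ PySem.Chars.isIn t.toList s = true) := by
  induction s generalizing acc with
  | nil =>
    rw [pvScanTokens]
    simp only [PySem.Chars.isIn_iff_infix, List.infix_nil]
    tauto
  | cons c rest ih =>
    rw [pvScanTokens, ih, pv_mem_step]
    simp only [PySem.Chars.isIn_iff_infix, PySem.Chars.startswith_iff, List.infix_cons_iff]
    tauto

lemma pv_contains_found (sig : String) (t : String) (hmem : t ∈ pvTokens) (ht : t.toList ≠ []) :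
    PySem.Set.contains (pvScanTokens sig.toList PySem.Set.empty) t = PySem.Str.isIn t sig := by
  have h := pv_mem_scanTokens sig.toList PySem.Set.empty t ht
  simp only [PySem.Set.empty, List.not_mem_nil, false_or] at h
  rw [PySem.Str.isIn_eq]
  cases hb : PySem.Chars.isIn t.toList sig.toList with
  | false =>
    have hnm : t ∉ pvScanTokens sig.toList PySem.Set.empty := fun hm => by
      have := (h.mp hm).2; simp [hb] at this
    simpa [PySem.Set.contains, PySem.Set.empty] using hnm
  | true =>
    have hm : t ∈ pvScanTokens sig.toList PySem.Set.empty := h.mpr ⟨hmem, hb⟩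
    simpa [PySem.Set.contains, PySem.Set.empty] using hm

-- ===== VERDICT (by name: the statement is the Claim_ definition above) =====
set_option maxHeartbeats 2000000 in
theorem select_primary_failure_class_spec : Claim_equal_select_primary_failure_class := by
  intro fs cfc _
  unfold Spec_select_primary_failure_class select_primary_failure_class select_primary_failure_class_alt
  simp only [pvPick, pvPriority]
  rw [pv_contains_found _ "backend-pytest" (by decide) (by decide),
     pv_contains_found _ "frontend-lint-warning" (by decide) (by decide),
     pv_contains_found _ "frontend-lint" (by decide) (by decide),
     pv_contains_found _ "frontend-typescript" (by decide) (by decide),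
     pv_contains_found _ "frontend-build" (by decide) (by decide),
     pv_contains_found _ "frontend-test" (by decide) (by decide),
     pv_contains_found _ "environment" (by decide) (by decide),
     pv_contains_found _ "env-dependency" (by decide) (by decide),
     pv_contains_found _ "filesystem" (by decide) (by decide)]
  simp only [List.any_cons, List.any_nil]
  split_ifs <;> simp_all
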